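-- pv_equiv track=rewrite | github.com/rayhanhanaputra/diffattack-sfn | diffAttack-evenRound.py | calcActiveSBox
-- ===== SOURCE A (Python) =====
-- def split2(a):
--     arr = [a >> 32]
--     arr += [a & 0xffffffff]
--     return arr
--
-- def split8(a):
--     arr = []
--     for i in range(8):
--         arr += [(a >> 28-4*i) & 0xf]
--     return arr
--
-- def split16(a):
--     arr = split2(a)
--     return split8(arr[0]) + split8(arr[1])
--
-- def calcActiveSBox(a):
--     splat16 = split16(a)
--     ind = 0
--     act = []
--     for s in splat16:
--         if s != 0:
--             act.append(ind)
--         ind += 1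
--
--     return act
-- ===== SOURCE B (Python) =====
-- def calcActiveSBox(a):
--     h = format(a & 0xFFFFFFFFFFFFFFFF, '016x')
--     return [i for i, c in enumerate(h) if c != '0']
-- ===== Notes on version B (the rewrite author's own statement) =====
-- stated objective: idiomatic
-- what changed: Replaces the shift/mask nibble decomposition through split2/split8/split16 and the manual index-counter loop by formatting the 64-bit value as a 16-digit hex string and scanning it with enumerate for non-'0' digits.
import Mathlib
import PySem

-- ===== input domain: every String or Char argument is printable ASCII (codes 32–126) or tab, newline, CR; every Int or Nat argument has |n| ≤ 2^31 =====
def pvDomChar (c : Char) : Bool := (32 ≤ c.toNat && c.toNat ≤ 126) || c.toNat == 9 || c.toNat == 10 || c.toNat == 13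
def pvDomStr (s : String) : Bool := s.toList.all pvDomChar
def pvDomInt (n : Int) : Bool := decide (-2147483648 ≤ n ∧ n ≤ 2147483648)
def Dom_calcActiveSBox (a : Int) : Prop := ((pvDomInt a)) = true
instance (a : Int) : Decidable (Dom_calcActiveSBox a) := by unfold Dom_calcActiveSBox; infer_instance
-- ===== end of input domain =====

-- B replaces A's split2/split8/split16 shift-mask nibble decomposition and index-counter loop by
-- formatting the low 64 bits as a 16-digit hex string and scanning it for non-'0' digits (idiomatic).

-- ===== PORT A =====
def split2 (a : Int) : List Int := [a >>> (32:Nat)] ++ [PySem.Int.band a 0xffffffff]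

def split8 (a : Int) : List Int :=
  (PySem.List.pyRange 0 8 1).foldl
    (fun arr i => arr ++ [PySem.Int.band (a >>> (28 - 4 * i).toNat) 15]) []
    -- Python's a >> (28-4*i): the shift amount is a nonnegative int for every i in range(8),
    -- so .toNat is exact here

def split16 (a : Int) : List Int :=
  let arr := split2 a
  split8 (PySem.List.pyGetD arr 0 0) ++ split8 (PySem.List.pyGetD arr 1 0)

def calcLoop : List Int → Int → List Int → List Int
  | [], _, act => act
  | s :: rest, ind, act => calcLoop rest (ind + 1) (if s ≠ 0 then act ++ [ind] else act)

def calcActiveSBox (a : Int) : List Int := calcLoop (split16 a) 0 []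

-- ===== PORT B =====
-- hexDigit d = the lowercase hex character of a nibble; fmt016x is an exact port of
-- format(m, '016x') for m < 2^64, the only values B applies it to
def hexDigit (d : Nat) : Char := if d < 10 then Char.ofNat (48 + d) else Char.ofNat (87 + d)

def fmt016x (m : Nat) : List Char :=
  (List.range 16).map (fun j => hexDigit (m >>> (4 * (15 - j)) % 16))

-- the comprehension [i for i, c in enumerate(h) if c != '0']
def hexComp : List (Int × Char) → List Int
  | [] => []
  | (i, c) :: rest => if c ≠ '0' then i :: hexComp rest else hexComp rest

def calcActiveSBox_alt (a : Int) : List Int :=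
  hexComp (PySem.List.enumerate (fmt016x (PySem.Int.band a 0xFFFFFFFFFFFFFFFF).toNat) 0)

-- ===== PRECONDITION & SPEC =====
def Spec_calcActiveSBox (a : Int) (out : List Int) : Prop := out = calcActiveSBox_alt a
instance (a : Int) (out : List Int) : Decidable (Spec_calcActiveSBox a out) := by unfold Spec_calcActiveSBox; infer_instance

-- ===== CLAIM (what is proved, stated in full; the proofs are below) =====
def Claim_equal_calcActiveSBox : Prop := ∀ (a : Int), Dom_calcActiveSBox a → Spec_calcActiveSBox a (calcActiveSBox a)

-- ===== LEMMAS AND PROOFS =====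

-- x & (2^4 - 1) = x mod 16, for every Int (Python-exact two's complement)
lemma band15 (x : Int) : PySem.Int.band x 15 = x % 16 := by
  by_cases hx : 0 ≤ x
  · simp only [PySem.Int.band, if_pos hx, if_pos (by norm_num : (0:Int) ≤ 15)]
    have h := Nat.and_two_pow_sub_one_eq_mod x.toNat 4
    norm_num at h
    rw [show ((15:Int)).toNat = 15 from rfl, h]
    omega
  · simp only [PySem.Int.band, if_neg hx, if_pos (by norm_num : (0:Int) ≤ 15)]
    have h : (-x - 1).toNat &&& 15 = (-x - 1).toNat % 16 := by
      have e : (-x - 1).toNat = (-x).toNat - 1 := by omega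
      have := Nat.and_two_pow_sub_one_eq_mod ((-x).toNat - 1) 4
      norm_num at this
      rw [e]
      exact this
    rw [show ((15:Int)).toNat = 15 from rfl, Nat.and_comm, h]
    omega

lemma band32 (x : Int) : PySem.Int.band x 0xffffffff = x % 4294967296 := by
  by_cases hx : 0 ≤ x
  · simp only [PySem.Int.band, if_pos hx, if_pos (by norm_num : (0:Int) ≤ 0xffffffff)]
    have h := Nat.and_two_pow_sub_one_eq_mod x.toNat 32
    norm_num at h
    rw [show ((0xffffffff:Int)).toNat = 4294967295 from rfl, h]
    omega
  · simp only [PySem.Int.band, if_neg hx, if_pos (by norm_num : (0:Int) ≤ 0xffffffff)]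
    have h : (-x - 1).toNat &&& 4294967295 = (-x - 1).toNat % 4294967296 := by
      have e : (-x - 1).toNat = (-x).toNat - 1 := by omega
      have := Nat.and_two_pow_sub_one_eq_mod ((-x).toNat - 1) 32
      norm_num at this
      rw [e]
      exact this
    rw [show ((0xffffffff:Int)).toNat = 4294967295 from rfl, Nat.and_comm, h]
    omega

lemma band64 (x : Int) : PySem.Int.band x 0xFFFFFFFFFFFFFFFF = x % 18446744073709551616 := by
  by_cases hx : 0 ≤ x
  · simp only [PySem.Int.band, if_pos hx, if_pos (by norm_num : (0:Int) ≤ 0xFFFFFFFFFFFFFFFF)]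
    have h := Nat.and_two_pow_sub_one_eq_mod x.toNat 64
    norm_num at h
    rw [show ((0xFFFFFFFFFFFFFFFF:Int)).toNat = 18446744073709551615 from rfl, h]
    omega
  · simp only [PySem.Int.band, if_neg hx, if_pos (by norm_num : (0:Int) ≤ 0xFFFFFFFFFFFFFFFF)]
    have h : (-x - 1).toNat &&& 18446744073709551615 = (-x - 1).toNat % 18446744073709551616 := by
      have e : (-x - 1).toNat = (-x).toNat - 1 := by omega
      have := Nat.and_two_pow_sub_one_eq_mod ((-x).toNat - 1) 64
      norm_num at this
      rw [e]
      exact this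
    rw [show ((0xFFFFFFFFFFFFFFFF:Int)).toNat = 18446744073709551615 from rfl, Nat.and_comm, h]
    omega

-- dropping a mod 2^m does not change nibble j as long as j + 4 ≤ m
lemma nib_drop (a : Int) (j m : Nat) (h : j + 4 ≤ m) :
    a % 2 ^ m / 2 ^ j % 16 = a / 2 ^ j % 16 := by
  have hj : ((2:Int) ^ j) ≠ 0 := by positivity
  have hsplit : (2:Int) ^ m = 2 ^ (m - j) * 2 ^ j := by
    rw [← pow_add]; congr 1; omega
  have h16 : (2:Int) ^ (m - j) = 16 * 2 ^ (m - j - 4) := by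
    rw [show (16:Int) = 2 ^ 4 from rfl, ← pow_add]; congr 1; omega
  have hmod : a % 2 ^ m = a + (-(2 ^ (m - j) * (a / 2 ^ m))) * 2 ^ j := by
    rw [Int.emod_def, hsplit]; ring
  rw [hmod, Int.add_mul_ediv_right _ _ hj, h16,
    show a / 2 ^ j + -(16 * 2 ^ (m - j - 4) * (a / 2 ^ m))
       = a / 2 ^ j + 16 * (-(2 ^ (m - j - 4) * (a / 2 ^ m))) from by ring,
    Int.add_mul_emod_self_left]

lemma shift_shift (a : Int) (j : Nat) : (a >>> (32:Nat)) >>> ((j:Nat):Int) = a >>> (32 + j) := by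
  rw [Int.shiftRight_natCast_right, Int.shiftRight_eq_div_pow, Int.shiftRight_eq_div_pow,
    Int.shiftRight_eq_div_pow, Int.ediv_ediv_of_nonneg (by positivity)]
  push_cast [pow_add]
  ring_nf

-- A's nibble of a >> E equals the hex digit value B reads at the same position
lemma elem_eq (a : Int) (E : Nat) (hE : E + 4 ≤ 64) :
    PySem.Int.band (a >>> E) 15
      = (((PySem.Int.band a 0xFFFFFFFFFFFFFFFF).toNat >>> E % 16 : Nat) : Int) := by
  rw [band15, band64]
  have hm : (0:Int) ≤ a % 18446744073709551616 := Int.emod_nonneg a (by norm_num)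
  have hcast : (((a % 18446744073709551616).toNat >>> E % 16 : Nat) : Int)
      = (a % 18446744073709551616) / 2 ^ E % 16 := by
    rw [Nat.shiftRight_eq_div_pow]
    push_cast [Int.toNat_of_nonneg hm]
    norm_num
  rw [hcast, Int.shiftRight_eq_div_pow]
  have h := nib_drop a E 64 hE
  norm_num at h ⊢
  omega

lemma hexDigit_eq_zero_iff (d : Nat) (h : d < 16) : hexDigit d = '0' ↔ d = 0 := by
  interval_cases d <;> simp [hexDigit]

-- per-position condition, high half: position with shift j in split8(a >> 32)
lemma hi_iff (a : Int) (j E : Nat) (hE : E = 32 + j) (hj : j ≤ 28) :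
    (PySem.Int.band ((a >>> (32:Nat)) >>> ((j:Nat):Int)) 15 ≠ 0)
      ↔ (hexDigit ((PySem.Int.band a 0xFFFFFFFFFFFFFFFF).toNat >>> E % 16) ≠ '0') := by
  subst hE
  rw [shift_shift, elem_eq a (32 + j) (by omega), not_iff_not]
  rw [hexDigit_eq_zero_iff _ (Nat.mod_lt _ (by norm_num))]
  omega

-- per-position condition, low half: position with shift j in split8(a & 0xffffffff)
lemma lo_iff (a : Int) (j E : Nat) (hE : E = j) (hj : j ≤ 28) :
    (PySem.Int.band (PySem.Int.band a 0xffffffff >>> ((j:Nat):Int)) 15 ≠ 0)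
      ↔ (hexDigit ((PySem.Int.band a 0xFFFFFFFFFFFFFFFF).toNat >>> E % 16) ≠ '0') := by
  rw [hE]
  have hlo : PySem.Int.band (PySem.Int.band a 0xffffffff >>> ((j:Nat):Int)) 15
      = PySem.Int.band (a >>> j) 15 := by
    rw [Int.shiftRight_natCast_right, band15, band15, band32,
      Int.shiftRight_eq_div_pow, Int.shiftRight_eq_div_pow]
    have h := nib_drop a j 32 (by omega)
    norm_num at h ⊢
    omega
  rw [hlo, elem_eq a j (by omega), not_iff_not]
  rw [hexDigit_eq_zero_iff _ (Nat.mod_lt _ (by norm_num))]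
  omega

-- proof-side normal form of A's loop
def sel : List Int → Int → List Int
  | [], _ => []
  | x :: xs, i => if x ≠ 0 then i :: sel xs (i + 1) else sel xs (i + 1)

lemma calcLoop_sel : ∀ (xs : List Int) (i : Int) (acc : List Int),
    calcLoop xs i acc = acc ++ sel xs i := by
  intro xs
  induction xs with
  | nil => intro i acc; simp [calcLoop, sel]
  | cons x xs ih =>
    intro i acc
    by_cases hx : x ≠ 0 <;> simp [calcLoop, sel, hx, ih, List.append_assoc]

-- A's loop and B's comprehension agree as soon as the per-index conditions agree
lemma sel_hexComp : ∀ (xs : List Int) (cs : List Char) (i : Int),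
    xs.length = cs.length →
    (∀ k (hk : k < xs.length) (hk' : k < cs.length), (xs[k] ≠ 0) ↔ (cs[k] ≠ '0')) →
    sel xs i = hexComp (PySem.List.enumerate cs i) := by
  intro xs
  induction xs with
  | nil =>
    intro cs i hlen _
    cases cs with
    | nil => simp [sel, PySem.List.enumerate_nil, hexComp]
    | cons c cs => simp at hlen
  | cons x xs ih =>
    intro cs i hlen hiff
    cases cs with
    | nil => simp at hlen
    | cons c cs =>
      rw [PySem.List.enumerate_cons]
      have h0 := hiff 0 (by simp) (by simp)
      simp only [List.getElem_cons_zero] at h0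
      have hrest := ih cs (i + 1) (by simpa using hlen)
        (fun k hk hk' => by simpa using hiff (k + 1) (by simpa using hk) (by simpa using hk'))
      by_cases hx : x ≠ 0
      · rw [sel, if_pos hx, hexComp, if_pos (h0.mp hx), hrest]
      · rw [sel, if_neg hx, hexComp, if_neg (fun hc => hx (h0.mpr hc)), hrest]

lemma pyRange8 : PySem.List.pyRange 0 8 1 = [0, 1, 2, 3, 4, 5, 6, 7] := by decide

lemma split8_eq (x : Int) :
    split8 x = [PySem.Int.band (x >>> ((28:Nat):Int)) 15, PySem.Int.band (x >>> ((24:Nat):Int)) 15,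
      PySem.Int.band (x >>> ((20:Nat):Int)) 15, PySem.Int.band (x >>> ((16:Nat):Int)) 15,
      PySem.Int.band (x >>> ((12:Nat):Int)) 15, PySem.Int.band (x >>> ((8:Nat):Int)) 15,
      PySem.Int.band (x >>> ((4:Nat):Int)) 15, PySem.Int.band (x >>> ((0:Nat):Int)) 15] := by
  simp [split8, pyRange8, List.foldl]

lemma range16 : List.range 16 = [0,1,2,3,4,5,6,7,8,9,10,11,12,13,14,15] := by decide

theorem calcActiveSBox_eq (a : Int) : calcActiveSBox a = calcActiveSBox_alt a := by
  rw [calcActiveSBox, calcActiveSBox_alt, calcLoop_sel, List.nil_append]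
  apply sel_hexComp
  · simp [split16, split8_eq, fmt016x, range16]
  · intro k hk hk'
    have hk16 : k < 16 := by
      simpa [split16, split8_eq] using hk
    simp only [show split16 a
        = split8 (a >>> (32:Nat)) ++ split8 (PySem.Int.band a 0xffffffff) from by
          simp [split16, split2, PySem.List.pyGetD]]
    simp only [show fmt016x (PySem.Int.band a 0xFFFFFFFFFFFFFFFF).toNat
        = (List.range 16).map
            (fun j => hexDigit ((PySem.Int.band a 0xFFFFFFFFFFFFFFFF).toNat >>> (4 * (15 - j)) % 16))
        from rfl]
    interval_cases k <;>
      simp only [split8_eq, range16, List.map_cons, List.map_nil, List.cons_append,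
        List.nil_append, List.getElem_cons_zero, List.getElem_cons_succ] <;>
      norm_num <;>
      first
        | exact hi_iff a _ _ (by norm_num) (by norm_num)
        | exact lo_iff a _ _ (by norm_num) (by norm_num)
        | exact hi_iff a 0 32 (by norm_num) (by norm_num)
        | exact lo_iff a 0 0 (by norm_num) (by norm_num)

-- ===== VERDICT (by name: the statement is the Claim_ definition above) =====
theorem calcActiveSBox_spec : Claim_equal_calcActiveSBox := by
  intro a _
  unfold Spec_calcActiveSBox
  exact calcActiveSBox_eq a
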